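-- pv_equiv track=rewrite | github.com/Lucas-Guimaraes/Reddit-Daily-Programmer | Easy Problems/231-240/236easy.py | tetris_validator
-- ===== SOURCE A (Python) =====
-- def tetris_validator(n):
--
--     bag = ['O', 'I', 'S', 'Z', 'L', 'J', 'T']
--     invalid_bag = [i * 3 for i in bag]
--     if set(bag) != set(n):
--         return False
--     for i in invalid_bag:
--         if i in n:
--             return False
--     else:
--         return True
-- ===== SOURCE B (Python) =====
-- def tetris_validator(n):
--     bag = ['O', 'I', 'S', 'Z', 'L', 'J', 'T']
--     if set(bag) != set(n):
--         return False
--     prev = None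
--     run = 0
--     for c in n:
--         run = run + 1 if c == prev else 1
--         if run >= 3:
--             return False
--         prev = c
--     return True
-- ===== Notes on version B (the rewrite author's own statement) =====
-- stated objective: simpler
-- what changed: The seven per-letter triple-substring searches are replaced by a single left-to-right scan over n that tracks the previous character and the current run length and fails as soon as a run reaches 3; the set-equality gate is kept.
import Mathlib
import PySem

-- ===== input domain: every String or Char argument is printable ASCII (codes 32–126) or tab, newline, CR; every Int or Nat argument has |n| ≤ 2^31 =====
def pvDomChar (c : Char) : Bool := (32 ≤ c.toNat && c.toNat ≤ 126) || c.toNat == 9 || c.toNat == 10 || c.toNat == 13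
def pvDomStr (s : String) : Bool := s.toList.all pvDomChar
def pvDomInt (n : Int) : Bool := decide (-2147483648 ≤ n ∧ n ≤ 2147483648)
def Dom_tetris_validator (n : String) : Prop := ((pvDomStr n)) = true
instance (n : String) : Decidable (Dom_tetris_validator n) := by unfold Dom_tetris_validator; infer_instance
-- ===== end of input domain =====

-- B replaces the seven substring searches with one left-to-right run-length scan (objective: simpler single pass).


-- ===== PORT A =====
-- Python 1-char strings are represented as Char; 'i * 3' is the 3-char list [i, i, i].
def tetris_validator (n : String) : Bool :=
  let bag : List Char := ['O', 'I', 'S', 'Z', 'L', 'J', 'T']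
  let invalid_bag : List (List Char) := bag.map (fun i => [i, i, i])
  if PySem.Set.equal (PySem.Set.ofList bag) (PySem.Set.ofList n.toList) = false then
    false
  else
    -- 'for i in invalid_bag: if i in n: return False' then 'return True'
    invalid_bag.all (fun i => !(PySem.Chars.isIn i n.toList))

-- ===== PORT B =====
-- the run-length scan of Source B: prev is the previous character, run the current run length
def pvAltScan : List Char → Option Char → Nat → Bool
  | [], _, _ => true
  | c :: rest, prev, run =>
    let run' := if (some c == prev) then run + 1 else 1
    if 3 ≤ run' then false else pvAltScan rest (some c) run'

def tetris_validator_alt (n : String) : Bool :=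
  let bag : List Char := ['O', 'I', 'S', 'Z', 'L', 'J', 'T']
  if PySem.Set.equal (PySem.Set.ofList bag) (PySem.Set.ofList n.toList) = false then
    false
  else
    pvAltScan n.toList none 0

-- ===== PRECONDITION & SPEC =====
def Spec_tetris_validator (n : String) (out : Bool) : Prop := out = tetris_validator_alt n
instance (n : String) (out : Bool) : Decidable (Spec_tetris_validator n out) := by unfold Spec_tetris_validator; infer_instance

-- ===== CLAIM (what is proved, stated in full; the proofs are below) =====
def Claim_equal_tetris_validator : Prop := ∀ (n : String), Dom_tetris_validator n → Spec_tetris_validator n (tetris_validator n)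

-- ===== LEMMAS AND PROOFS =====

-- a list contains three equal consecutive characters
def hasTriple : List Char → Bool
  | a :: b :: c :: t => (a == b && b == c) || hasTriple (b :: c :: t)
  | _ => false

theorem hasTriple_iff (l : List Char) : hasTriple l = true ↔ ∃ x, [x, x, x] <:+: l := by
  induction l using hasTriple.induct with
  | case1 a b c t ih =>
    simp only [hasTriple, Bool.or_eq_true, Bool.and_eq_true, beq_iff_eq, ih]
    constructor
    · rintro (⟨rfl, rfl⟩ | ⟨x, hx⟩)
      · exact ⟨a, [], t, rfl⟩
      · exact ⟨x, hx.trans (List.suffix_cons a (b :: c :: t)).isInfix⟩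
    · rintro ⟨x, hx⟩
      rcases List.infix_cons_iff.mp hx with hpre | hinf
      · obtain ⟨h0, hpre1⟩ := List.cons_prefix_cons.mp hpre
        obtain ⟨h1, hpre2⟩ := List.cons_prefix_cons.mp hpre1
        obtain ⟨h2, _⟩ := List.cons_prefix_cons.mp hpre2
        exact Or.inl ⟨by rw [← h0, ← h1], by rw [← h1, ← h2]⟩
      · exact Or.inr ⟨x, hinf⟩
  | case2 l h =>
    constructor
    · intro hl
      exfalso
      match l, h with
      | [], _ => simp [hasTriple] at hl
      | [a], _ => simp [hasTriple] at hl
      | [a, b], _ => simp [hasTriple] at hl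
      | a :: b :: c :: t, h => exact h a b c t rfl
    · rintro ⟨x, hx⟩
      have := hx.length_le
      exfalso
      match l, h with
      | [], _ => simp at this
      | [a], _ => simp at this
      | [a, b], _ => simp at this
      | a :: b :: c :: t, h => exact h a b c t rfl

theorem pvAltScan_pair (l : List Char) :
    (∀ a, pvAltScan l (some a) 1 = !hasTriple (a :: l)) ∧
    (∀ b, pvAltScan l (some b) 2 = !hasTriple (b :: b :: l)) := by
  induction l with
  | nil => constructor <;> intro _ <;> simp [pvAltScan, hasTriple]
  | cons c t ih =>
    obtain ⟨ih1, ih2⟩ := ih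
    constructor
    · intro a
      by_cases h : c = a
      · subst h
        simp only [pvAltScan, beq_iff_eq]
        norm_num
        rw [ih2 c]
      · simp only [pvAltScan, beq_iff_eq, Option.some.injEq, if_neg h]
        norm_num
        rw [ih1 c]
        cases t with
        | nil => simp [hasTriple]
        | cons d t' =>
          simp [hasTriple]
          exact fun _ => Or.inl fun hh => h hh.symm
    · intro b
      by_cases h : c = b
      · subst h
        simp only [pvAltScan, beq_iff_eq]
        norm_num
        simp [hasTriple]
      · simp only [pvAltScan, beq_iff_eq, Option.some.injEq, if_neg h]
        norm_num
        rw [ih1 c]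
        have hne : ¬ b = c := fun hh => h hh.symm
        have hbc : (b == c) = false := beq_eq_false_iff_ne.mpr hne
        cases t with
        | nil => simp [hasTriple, hbc]
        | cons d t' => simp [hasTriple, hbc]

theorem pvAltScan_none (l : List Char) : pvAltScan l none 0 = !hasTriple l := by
  cases l with
  | nil => simp [pvAltScan, hasTriple]
  | cons c t =>
    simp only [pvAltScan]
    norm_num
    exact (pvAltScan_pair t).1 c

theorem all_eq_not_hasTriple (l : List Char)
    (heq : ∀ x : Char, x ∈ (['O', 'I', 'S', 'Z', 'L', 'J', 'T'] : List Char) ↔ x ∈ l) :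
    ((['O', 'I', 'S', 'Z', 'L', 'J', 'T'] : List Char).map (fun i => [i, i, i])).all
      (fun i => !(PySem.Chars.isIn i l)) = !hasTriple l := by
  rw [Bool.eq_iff_iff]
  simp only [List.all_eq_true, List.mem_map, Bool.not_eq_true']
  constructor
  · intro hall
    rw [← Bool.not_eq_true, hasTriple_iff l]
    rintro ⟨x, hx⟩
    have hmem : x ∈ l := hx.sublist.mem (by simp)
    have hbag : x ∈ (['O', 'I', 'S', 'Z', 'L', 'J', 'T'] : List Char) := (heq x).mpr hmem
    have h2 := hall _ ⟨x, hbag, rfl⟩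
    rw [PySem.Chars.isIn_eq_false_iff] at h2
    exact h2 hx
  · rintro hng i ⟨x, _, rfl⟩
    rw [PySem.Chars.isIn_eq_false_iff]
    intro hx
    have ht : hasTriple l = true := (hasTriple_iff l).mpr ⟨x, hx⟩
    rw [hng] at ht
    exact Bool.false_ne_true ht

-- ===== VERDICT (by name: the statement is the Claim_ definition above) =====
theorem tetris_validator_spec : Claim_equal_tetris_validator := by
  intro n _
  unfold Spec_tetris_validator tetris_validator tetris_validator_alt
  cases hgate : PySem.Set.equal (PySem.Set.ofList (['O', 'I', 'S', 'Z', 'L', 'J', 'T'] : List Char)) (PySem.Set.ofList n.toList) with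
  | false => simp [hgate]
  | true =>
    simp only [hgate, Bool.true_eq_false, if_false]
    rw [pvAltScan_none]
    apply all_eq_not_hasTriple
    intro x
    have h := (PySem.Set.equal_iff _ _).mp hgate x
    rw [PySem.Set.mem_ofList, PySem.Set.mem_ofList] at h
    exact h
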